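-- pv_equiv track=rewrite | github.com/kristinauh/42-401-combat-sensing | imu_analysis/imu_split_events.py | find_check_fall_windows
-- ===== SOURCE A (Python) =====
-- TARGET_STATE = "CHECK_FALL"
--
-- def find_check_fall_windows(states):
--     windows = []
--     i = 0
--     n = len(states)
--
--     while i < n:
--         if states[i] == TARGET_STATE:
--             start = i
--             while i + 1 < n and states[i + 1] == TARGET_STATE:
--                 i += 1
--             end = i
--             windows.append((start, end))
--         i += 1
--
--     return windows
-- ===== SOURCE B (Python) =====
-- from itertools import groupby
--
-- TARGET_STATE = "CHECK_FALL"
--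
-- def find_check_fall_windows(states):
--     windows = []
--     i = 0
--     for val, grp in groupby(states):
--         length = sum(1 for _ in grp)
--         if val == TARGET_STATE:
--             windows.append((i, i + length - 1))
--         i += length
--     return windows
-- ===== Notes on version B (the rewrite author's own statement) =====
-- stated objective: idiomatic
-- what changed: Replaces the manual nested index-walk with an itertools.groupby traversal that partitions the sequence into maximal equal runs and keeps a running start index, emitting a window for each CHECK_FALL run.
import Mathlib
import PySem

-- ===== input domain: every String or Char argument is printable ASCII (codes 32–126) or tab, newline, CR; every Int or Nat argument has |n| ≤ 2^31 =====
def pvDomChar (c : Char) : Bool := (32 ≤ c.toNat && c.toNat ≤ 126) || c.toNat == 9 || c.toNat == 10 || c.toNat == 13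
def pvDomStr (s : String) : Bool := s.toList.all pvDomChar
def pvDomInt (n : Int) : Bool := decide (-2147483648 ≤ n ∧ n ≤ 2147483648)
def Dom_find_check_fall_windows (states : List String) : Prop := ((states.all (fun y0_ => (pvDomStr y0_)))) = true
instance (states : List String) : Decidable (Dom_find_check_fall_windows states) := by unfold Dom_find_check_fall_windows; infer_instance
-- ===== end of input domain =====

-- B replaces A's manual nested index-walk with a run-grouping traversal (itertools.groupby); same cost, a different decomposition.

-- ===== PORT A =====
-- inner while loop: advance i while the next element is also TARGET_STATE.
-- The fuel argument only makes the recursion structural (fuel = n suffices, i grows each step);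
-- index accesses are always in range (0 ≤ i < n), so List.getD is exact here.
def innerA (states : List String) (n : Nat) : Nat → Nat → Nat
  | 0, i => i
  | fuel + 1, i =>
    if i + 1 < n ∧ states.getD (i + 1) "" = "CHECK_FALL" then innerA states n fuel (i + 1) else i

-- outer while loop of A (fuel = n suffices: i grows by at least 1 per iteration)
def outerA (states : List String) (n : Nat) : Nat → Nat → List (Int × Int)
  | 0, _ => []
  | fuel + 1, i =>
    if i < n then
      if states.getD i "" = "CHECK_FALL" then
        ((i : Int), (innerA states n n i : Int)) :: outerA states n fuel (innerA states n n i + 1)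
      else outerA states n fuel (i + 1)
    else []

def find_check_fall_windows (states : List String) : List (Int × Int) :=
  outerA states states.length states.length 0

-- ===== PORT B =====
-- groupby over states: each step consumes the maximal run of the head value
-- (takeWhile/dropWhile = consuming the group) and keeps the running index i.
-- The fuel argument only makes the recursion structural (fuel = length suffices).
def goB : Nat → List String → Nat → List (Int × Int)
  | 0, _, _ => []
  | _ + 1, [], _ => []
  | fuel + 1, v :: rest, i =>
    let len := 1 + (rest.takeWhile (· == v)).length
    (if v = "CHECK_FALL" then [((i : Int), ((i + len : Nat) : Int) - 1)] else [])
      ++ goB fuel (rest.dropWhile (· == v)) (i + len)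

def find_check_fall_windows_alt (states : List String) : List (Int × Int) :=
  goB states.length states 0

-- ===== PRECONDITION & SPEC =====
def Spec_find_check_fall_windows (states : List String) (out : List (Int × Int)) : Prop := out = find_check_fall_windows_alt states
instance (states : List String) (out : List (Int × Int)) : Decidable (Spec_find_check_fall_windows states out) := by unfold Spec_find_check_fall_windows; infer_instance

-- ===== CLAIM (what is proved, stated in full; the proofs are below) =====
def Claim_equal_find_check_fall_windows : Prop := ∀ (states : List String), Dom_find_check_fall_windows states → Spec_find_check_fall_windows states (find_check_fall_windows states)

-- ===== LEMMAS AND PROOFS =====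

-- takeWhile/dropWhile over an all-true prefix followed by a list whose head fails the predicate
lemma tw_dw_append {α : Type} (p : α → Bool) :
    ∀ (r t : List α), (∀ x ∈ r, p x = true) → t.takeWhile p = [] →
      (r ++ t).takeWhile p = r ∧ (r ++ t).dropWhile p = t := by
  intro r t hr ht
  induction r with
  | nil =>
    refine ⟨by simpa using ht, ?_⟩
    cases t with
    | nil => rfl
    | cons b t' =>
      have hb : p b = false := by
        by_contra hb
        simp [(by simpa using hb : p b = true)] at ht
      simp [hb]
  | cons a r ih =>
    have ha : p a = true := hr a (by simp)
    have hr' : ∀ x ∈ r, p x = true := fun x hx => hr x (by simp [hx])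
    obtain ⟨h1, h2⟩ := ih hr'
    constructor
    · rw [List.cons_append, List.takeWhile_cons_of_pos ha, h1]
    · rw [List.cons_append, List.dropWhile_cons_of_pos ha, h2]

lemma goB_nil (fuel i : Nat) : goB fuel [] i = [] := by
  cases fuel <;> rfl

-- goB does not depend on the fuel once it is at least the list length
lemma goB_congr (fuel₁ : Nat) :
    ∀ (l : List String) (i fuel₂ : Nat), l.length ≤ fuel₁ → l.length ≤ fuel₂ →
      goB fuel₁ l i = goB fuel₂ l i := by
  induction fuel₁ with
  | zero =>
    intro l i fuel₂ h1 _
    have : l = [] := by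
      cases l with
      | nil => rfl
      | cons a l => simp at h1
    rw [this, goB_nil, goB_nil]
  | succ f ih =>
    intro l i fuel₂ h1 h2
    cases l with
    | nil => rw [goB_nil, goB_nil]
    | cons v rest =>
      cases fuel₂ with
      | zero => simp at h2
      | succ f2 =>
        rw [goB, goB]
        have hd : (rest.dropWhile (· == v)).length ≤ rest.length :=
          List.Sublist.length_le (List.dropWhile_sublist _)
        simp only [List.length_cons] at h1 h2
        rw [ih (rest.dropWhile (· == v)) _ f2 (by omega) (by omega)]

-- innerA computes i plus the length of the maximal TARGET run starting after i
lemma innerA_eq (states : List String) :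
    ∀ (fuel i : Nat), states.length - i ≤ fuel →
      innerA states states.length fuel i
        = i + ((states.drop (i + 1)).takeWhile (· == "CHECK_FALL")).length := by
  intro fuel
  induction fuel with
  | zero =>
    intro i hf
    have hnil : states.drop (i + 1) = [] := List.drop_eq_nil_of_le (by omega)
    simp [innerA, hnil]
  | succ f ih =>
    intro i hf
    rw [innerA]
    by_cases h : i + 1 < states.length ∧ states.getD (i + 1) "" = "CHECK_FALL"
    · obtain ⟨h1, h2⟩ := h
      have hdrop : states.drop (i + 1) = states[i+1] :: states.drop (i + 1 + 1) :=
        List.drop_eq_getElem_cons h1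
      have hget : states[i+1] = "CHECK_FALL" := by
        rw [← List.getD_eq_getElem states "" h1]; exact h2
      rw [if_pos ⟨h1, h2⟩, ih (i + 1) (by omega), hdrop, hget]
      simp
      omega
    · rw [if_neg h]
      by_cases h1 : i + 1 < states.length
      · have h2 : ¬ states.getD (i + 1) "" = "CHECK_FALL" := fun hc => h ⟨h1, hc⟩
        have hdrop : states.drop (i + 1) = states[i+1] :: states.drop (i + 1 + 1) :=
          List.drop_eq_getElem_cons h1
        have hget : states[i+1] ≠ "CHECK_FALL" := by
          rw [← List.getD_eq_getElem states "" h1]; exact h2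
        rw [hdrop]
        simp [hget]
      · have hnil : states.drop (i + 1) = [] := List.drop_eq_nil_of_le (by omega)
        simp [hnil]

-- B consumes a whole run of equal non-target values in one step
lemma goB_run (v : String) (hv : v ≠ "CHECK_FALL") (r t : List String) (j fuel : Nat)
    (hr : ∀ x ∈ r, x = v) (ht : t.takeWhile (· == v) = []) :
    goB (fuel + 1) ((v :: r) ++ t) j = goB fuel t (j + (1 + r.length)) := by
  have hr' : ∀ x ∈ r, (· == v) x = true := by
    intro x hx; simp [hr x hx]
  obtain ⟨h1, h2⟩ := tw_dw_append (· == v) r t hr' ht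
  rw [List.cons_append, goB]
  simp only [h1, h2, if_neg hv, List.nil_append]

-- main invariant: A from absolute index i = B on the suffix from i
lemma main_inv (states : List String) :
    ∀ (fuel i : Nat), states.length - i ≤ fuel →
      outerA states states.length fuel i
        = goB (states.drop i).length (states.drop i) i := by
  intro fuel
  induction fuel with
  | zero =>
    intro i hf
    have hnil : states.drop i = [] := List.drop_eq_nil_of_le (by omega)
    rw [outerA, hnil, goB_nil]
  | succ f ih =>
    intro i hf
    rw [outerA]
    by_cases hi : i < states.length
    · have hdrop : states.drop i = states[i] :: states.drop (i + 1) :=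
        List.drop_eq_getElem_cons hi
      have hget : states.getD i "" = states[i] := List.getD_eq_getElem states "" hi
      set v := states[i] with hv
      set rest := states.drop (i + 1) with hrest
      have hrlen : rest.length = states.length - (i + 1) := by
        rw [hrest, List.length_drop]
      have hdlen : (states.drop i).length = rest.length + 1 := by
        rw [hdrop, List.length_cons]
      rw [if_pos hi, hdlen, hdrop]
      by_cases hT : v = "CHECK_FALL"
      · -- target run: A's inner loop ends exactly where B's group ends
        set k := (rest.takeWhile (· == "CHECK_FALL")).length with hk
        have hk_le : k ≤ rest.length := by
          rw [hk]; exact List.Sublist.length_le (List.takeWhile_sublist _)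
        have hE : innerA states states.length states.length i = i + k := by
          rw [innerA_eq states states.length i (by omega), ← hrest, ← hk]
        have hsk : rest.drop k = rest.dropWhile (· == "CHECK_FALL") := by
          conv_lhs => rw [← List.takeWhile_append_dropWhile (p := (· == "CHECK_FALL")) (l := rest)]
          rw [hk, List.drop_left]
        have hdw : states.drop (i + k + 1) = rest.dropWhile (· == "CHECK_FALL") := by
          rw [← hsk, hrest, List.drop_drop]
          congr 1
          omega
        rw [if_pos (by rw [hget]; exact hT), hE,
            ih (i + k + 1) (by omega), hdw, goB]
        simp only [hT, if_true, List.singleton_append, ← hk]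
        have hfuel : (rest.dropWhile (· == "CHECK_FALL")).length ≤ rest.length :=
          List.Sublist.length_le (List.dropWhile_sublist _)
        rw [goB_congr _ _ _ _ le_rfl hfuel]
        have h1n : i + k + 1 = i + (1 + k) := by omega
        rw [h1n]
        have hval : ((↑(i + (1 + k)) : Int) - 1) = ((↑(i + k) : Nat) : Int) := by
          push_cast; ring
        rw [hval]
      · -- non-target: A steps by 1, B consumes the whole run of v
        rw [if_neg (by rw [hget]; exact hT), ih (i + 1) (by omega), ← hrest]
        cases hr0 : rest.takeWhile (· == v) with
        | nil =>
          have hdw : rest.dropWhile (· == v) = rest := by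
            conv_rhs => rw [← List.takeWhile_append_dropWhile (p := (· == v)) (l := rest),
              hr0, List.nil_append]
          rw [goB]
          simp only [hr0, hdw, if_neg hT, List.nil_append, List.length_nil]
        | cons a r' =>
          have hav : a = v := by
            have ha' : a ∈ rest.takeWhile (· == v) := by
              rw [hr0]; exact List.mem_cons_self
            simpa using List.mem_takeWhile_imp ha'
          have hrall : ∀ x ∈ r', x = v := by
            intro x hx
            have hx' : x ∈ rest.takeWhile (· == v) := by
              rw [hr0]; exact List.mem_cons_of_mem _ hx
            simpa using List.mem_takeWhile_imp hx'
          have hsplit : rest = (a :: r') ++ rest.dropWhile (· == v) := by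
            conv_lhs => rw [← List.takeWhile_append_dropWhile (p := (· == v)) (l := rest), hr0]
          set t := rest.dropWhile (· == v) with ht
          have htw : t.takeWhile (· == v) = [] := by
            rw [ht]
            cases hcase : rest.dropWhile (· == v) with
            | nil => rfl
            | cons b t' =>
              have hb := List.head_dropWhile_not (p := (· == v)) (l := rest) (by simp [hcase])
              have hbf : (b == v) = false := by
                simp only [hcase, List.head_cons] at hb
                simpa using hb
              simp [hbf]
          have hdt : t.length ≤ rest.length := by
            rw [ht]; exact List.Sublist.length_le (List.dropWhile_sublist _)
          have hlen : rest.length = (1 + r'.length) + t.length := by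
            conv_lhs => rw [hsplit]
            simp only [List.length_append, List.length_cons]
            omega
          have hL : goB (rest.length + 1) (v :: rest) i
              = goB t.length t (i + (1 + (1 + r'.length))) := by
            rw [goB]
            simp only [hr0, ← ht, if_neg hT, List.nil_append, List.length_cons]
            rw [goB_congr rest.length t _ t.length hdt le_rfl]
            congr 1
            omega
          rw [hL]
          have hc1 : goB rest.length rest (i + 1)
              = goB ((r'.length + t.length) + 1) rest (i + 1) :=
            goB_congr _ _ _ _ le_rfl (by omega)
          rw [hc1, hsplit, hav,
            goB_run v hT r' t (i + 1) (r'.length + t.length) hrall htw,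
            goB_congr (r'.length + t.length) t _ t.length (by omega) le_rfl]
          congr 1
          omega
    · have hnil : states.drop i = [] := List.drop_eq_nil_of_le (by omega)
      rw [if_neg hi, hnil, goB_nil]

-- ===== VERDICT (by name: the statement is the Claim_ definition above) =====
theorem find_check_fall_windows_spec : Claim_equal_find_check_fall_windows := by
  intro states _
  unfold Spec_find_check_fall_windows find_check_fall_windows find_check_fall_windows_alt
  have h := main_inv states states.length 0 (by omega)
  simpa using h
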